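-- pv_equiv track=rewrite | github.com/abdulzain6/Academi-AI-backend | api/lib/presentation_maker/presentation_maker.py | reduce_points_by_word_limit
-- ===== SOURCE A (Python) =====
-- from typing import Any, Dict, Optional, List, Tuple
--
-- def reduce_points_by_word_limit(text: str, word_limit: int, current_count: int) -> Tuple[str, int]:
--     points = text.split("\n")
--     reduced_points = []
--     current_word_count = current_count
--
--     for point in points:
--         point_word_count = len(point.split())
--         new_word_count = current_word_count + point_word_count
--
--         if new_word_count <= word_limit:
--             reduced_points.append(point.strip())  # Remove leading/trailing whitespace
--             current_word_count = new_word_count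
--         else:
--             break
--
--     return "\n".join(reduced_points).strip(), current_word_count  # Remove leading/trailing whitespace
-- ===== SOURCE B (Python) =====
-- def reduce_points_by_word_limit(text, word_limit, current_count):
--     points = text.split("\n")
--     # prefix sums of word counts, starting from current_count
--     cums = [current_count]
--     t = current_count
--     for p in points:
--         t += len(p.split())
--         cums.append(t)
--     # index of the first point whose cumulative count exceeds the limit
--     k = next((i for i, c in enumerate(cums[1:]) if c > word_limit), len(points))
--     return "\n".join(p.strip() for p in points[:k]).strip(), cums[k]
-- ===== Notes on version B (the rewrite author's own statement) =====
-- stated objective: idiomatic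
-- what changed: Replaces A's mutable single-pass loop with break by a prefix-sum list over the per-line word counts, selecting the kept prefix as the points before the first cumulative total exceeding the limit and reading the returned count directly off the prefix-sum list.
import Mathlib
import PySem

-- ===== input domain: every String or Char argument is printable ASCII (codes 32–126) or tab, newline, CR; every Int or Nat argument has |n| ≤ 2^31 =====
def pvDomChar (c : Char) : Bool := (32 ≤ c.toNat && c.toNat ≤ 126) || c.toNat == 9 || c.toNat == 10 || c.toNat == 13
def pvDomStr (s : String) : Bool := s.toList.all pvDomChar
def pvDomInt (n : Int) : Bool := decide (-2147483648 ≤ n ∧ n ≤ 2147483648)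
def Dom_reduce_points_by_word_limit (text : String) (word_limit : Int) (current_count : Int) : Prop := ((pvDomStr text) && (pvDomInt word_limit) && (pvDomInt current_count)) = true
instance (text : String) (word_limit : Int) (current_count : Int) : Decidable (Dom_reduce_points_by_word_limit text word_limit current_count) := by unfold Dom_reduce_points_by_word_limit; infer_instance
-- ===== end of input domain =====

-- B replaces A's break-loop with a prefix-sum list and a first-exceedance index (idiomatic; same O(n) cost).

-- ===== PORT A =====
-- the for-loop with break: carries (reduced_points, current_word_count)
def pvALoop (word_limit : Int) : List String → List String → Int → List String × Int
  | [], acc, c => (acc, c)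
  | p :: rest, acc, c =>
    let pwc : Int := ((PySem.Str.split₀ p).length : Int)
    let nwc := c + pwc
    if nwc ≤ word_limit then pvALoop word_limit rest (acc ++ [PySem.Str.strip p]) nwc
    else (acc, c)

def reduce_points_by_word_limit (text : String) (word_limit : Int) (current_count : Int) : String × Int :=
  let points := (PySem.Str.split? text "\n").getD []
  let r := pvALoop word_limit points [] current_count
  (PySem.Str.strip (PySem.Str.join "\n" r.1), r.2)

-- ===== PORT B =====
-- prefix-sum list: loop appending the running total (state = (cums, t))
def pvBCums (points : List String) (c0 : Int) : List Int × Int :=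
  points.foldl (fun s p =>
    let t := s.2 + ((PySem.Str.split₀ p).length : Int)
    (s.1 ++ [t], t)) ([c0], c0)

def reduce_points_by_word_limit_alt (text : String) (word_limit : Int) (current_count : Int) : String × Int :=
  let points := (PySem.Str.split? text "\n").getD []
  let cums := (pvBCums points current_count).1
  -- next((i for i, c in enumerate(cums[1:]) if c > word_limit), len(points))
  let k := ((cums.drop 1).findIdx? (fun c => word_limit < c)).getD points.length
  (PySem.Str.strip (PySem.Str.join "\n" ((points.take k).map PySem.Str.strip)), cums.getD k 0)

-- ===== PRECONDITION & SPEC =====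
def Spec_reduce_points_by_word_limit (text : String) (word_limit : Int) (current_count : Int) (out : String × Int) : Prop := out = reduce_points_by_word_limit_alt text word_limit current_count
instance (text : String) (word_limit : Int) (current_count : Int) (out : String × Int) : Decidable (Spec_reduce_points_by_word_limit text word_limit current_count out) := by unfold Spec_reduce_points_by_word_limit; infer_instance

-- ===== CLAIM (what is proved, stated in full; the proofs are below) =====
def Claim_equal_reduce_points_by_word_limit : Prop := ∀ (text : String) (word_limit : Int) (current_count : Int), Dom_reduce_points_by_word_limit text word_limit current_count → Spec_reduce_points_by_word_limit text word_limit current_count (reduce_points_by_word_limit text word_limit current_count)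

-- ===== LEMMAS AND PROOFS =====

-- common reference recursion: kept points (unstripped) and final count
def pvTake (wl : Int) : List String → Int → List String × Int
  | [], c => ([], c)
  | p :: rest, c =>
    let c' := c + ((PySem.Str.split₀ p).length : Int)
    if c' ≤ wl then
      let r := pvTake wl rest c'
      (p :: r.1, r.2)
    else ([], c)

lemma pvALoop_eq (wl : Int) (points : List String) : ∀ (acc : List String) (c : Int),
    pvALoop wl points acc c = (acc ++ ((pvTake wl points c).1).map PySem.Str.strip, (pvTake wl points c).2) := by
  induction points with
  | nil => intro acc c; simp [pvALoop, pvTake]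
  | cons p rest ih =>
    intro acc c
    simp only [pvALoop, pvTake]
    split_ifs with h
    · simp [ih]
    · simp

-- tail/last of the prefix sums
def pvCumTail (points : List String) (t : Int) : List Int :=
  match points with
  | [] => []
  | p :: rest => (t + ((PySem.Str.split₀ p).length : Int)) :: pvCumTail rest (t + ((PySem.Str.split₀ p).length : Int))

lemma pvBCums_go (points : List String) : ∀ (pre : List Int) (t : Int),
    points.foldl (fun (s : List Int × Int) p =>
      let t := s.2 + ((PySem.Str.split₀ p).length : Int)
      (s.1 ++ [t], t)) (pre ++ [t], t)
    = ((pre ++ [t]) ++ pvCumTail points t, ((pre ++ [t]) ++ pvCumTail points t).getLast (by simp)) := by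
  induction points with
  | nil => intro pre t; simp [pvCumTail]
  | cons p rest ih =>
    intro pre t
    simp only [List.foldl_cons, pvCumTail]
    have := ih (pre ++ [t]) (t + ((PySem.Str.split₀ p).length : Int))
    simp only [List.append_assoc, List.singleton_append] at this ⊢
    exact this

lemma pvBCums_fst (points : List String) (c : Int) :
    (pvBCums points c).1 = c :: pvCumTail points c := by
  have := pvBCums_go points [] c
  simp only [List.nil_append] at this
  simp [pvBCums, this]

-- B's selection equals the reference recursion
lemma pvB_sel (wl : Int) (points : List String) : ∀ (c : Int),
    points.take (((pvCumTail points c).findIdx? (fun x => wl < x)).getD points.length)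
      = (pvTake wl points c).1
    ∧ (c :: pvCumTail points c).getD (((pvCumTail points c).findIdx? (fun x => wl < x)).getD points.length) 0
      = (pvTake wl points c).2 := by
  induction points with
  | nil => intro c; simp [pvCumTail, pvTake]
  | cons p rest ih =>
    intro c
    simp only [pvCumTail, pvTake, List.findIdx?_cons, List.length_cons]
    by_cases h : wl < c + ((PySem.Str.split₀ p).length : Int)
    · simp [h, not_le.mpr h]
    · obtain ⟨ih1, ih2⟩ := ih (c + ((PySem.Str.split₀ p).length : Int))
      rcases hfi : List.findIdx? (fun x => decide (wl < x)) (pvCumTail rest (c + ((PySem.Str.split₀ p).length : Int))) with _ | j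
      all_goals rw [hfi] at ih1 ih2
      all_goals rw [if_neg (show ¬ (decide (wl < c + ((PySem.Str.split₀ p).length : Int)) = true) by simpa using h),
        if_pos (not_lt.mp h)]
      all_goals clear ih hfi
      all_goals simp only [Option.map_none, Option.map_some, Option.getD_none, Option.getD_some] at ih1 ih2 ⊢
      all_goals exact ⟨by rw [List.take_succ_cons, ih1], by rw [List.getD_cons_succ, ih2]⟩

-- ===== VERDICT (by name: the statement is the Claim_ definition above) =====
theorem reduce_points_by_word_limit_spec : Claim_equal_reduce_points_by_word_limit := by
  intro text wl cc _
  unfold Spec_reduce_points_by_word_limit reduce_points_by_word_limit reduce_points_by_word_limit_alt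
  simp only [pvBCums_fst, List.drop_one, List.tail_cons]
  obtain ⟨h1, h2⟩ := pvB_sel wl ((PySem.Str.split? text "\n").getD []) cc
  rw [pvALoop_eq]
  simp only [List.getD] at h2
  simp [h1, h2]
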